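-- pv_equiv track=rewrite | github.com/james0248/KoASR | wav2vec2/util.py | remove_duplicate_tokens
-- ===== SOURCE A (Python) =====
-- def remove_duplicate_tokens(token_list):
--     prev_token = -1
--     clean_token_list = []
--     for token in token_list:
--         if token == 49:
--             prev_token = -1
--         elif token != prev_token:
--             prev_token = token
--             clean_token_list.append(token)
--
--     return clean_token_list
-- ===== SOURCE B (Python) =====
-- def remove_duplicate_tokens(token_list):
--     # pair every token with the element before it (None for the first),
--     # keep a token iff it starts a new run and is not the blank token 49
--     return [tok for prev, tok in zip([None] + token_list, token_list)
--             if tok != 49 and prev != tok]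
-- ===== Notes on version B (the rewrite author's own statement) =====
-- stated objective: idiomatic
-- what changed: A's single stateful loop with a prev_token/-1-reset state machine is replaced by a stateless comprehension over (previous element, token) pairs from zip: collapse run starts, then drop blanks, with no mutable state.
-- intended difference: On lists where -1 occurs as the first token or immediately after a blank (49), A drops that -1 because -1 doubles as its internal 'no previous token' sentinel (A returns the list without it), while B keeps it like any other token id, which is the intended behaviour of a generic CTC collapse. — e.g. on remove_duplicate_tokens([-1]): A returns [], B returns [-1]
import Mathlib
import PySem

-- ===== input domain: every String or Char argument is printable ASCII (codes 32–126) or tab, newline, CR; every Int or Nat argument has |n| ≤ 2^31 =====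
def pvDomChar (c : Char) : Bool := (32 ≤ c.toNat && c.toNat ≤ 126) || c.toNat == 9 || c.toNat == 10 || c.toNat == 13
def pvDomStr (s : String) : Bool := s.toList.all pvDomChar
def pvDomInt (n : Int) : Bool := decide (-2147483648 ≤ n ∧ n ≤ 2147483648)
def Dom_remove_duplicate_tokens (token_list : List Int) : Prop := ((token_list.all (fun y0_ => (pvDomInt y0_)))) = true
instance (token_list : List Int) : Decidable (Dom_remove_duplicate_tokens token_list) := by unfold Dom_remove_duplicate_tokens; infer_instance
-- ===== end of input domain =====

-- B replaces A's stateful prev/reset loop by a stateless comprehension over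
-- (previous element, token) pairs; B keeps -1 tokens that A's sentinel drops (see D_).

-- ===== PORT A =====
-- the loop body of A, one step of the fold over (prev_token, clean_token_list)
def pvStepA (s : Int × List Int) (token : Int) : Int × List Int :=
  if token = 49 then (-1, s.2)
  else if token ≠ s.1 then (token, s.2 ++ [token])
  else s

def remove_duplicate_tokens (token_list : List Int) : List Int :=
  (token_list.foldl pvStepA (-1, [])).2

-- ===== PORT B =====
-- [tok for prev, tok in zip([None] + token_list, token_list) if tok != 49 and prev != tok]
def remove_duplicate_tokens_alt (token_list : List Int) : List Int :=
  ((List.zip ((none : Option Int) :: token_list.map some) token_list).filter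
      (fun p => p.2 != 49 && p.1 != some p.2)).map Prod.snd

-- ===== PRECONDITION & SPEC =====
-- On lists where -1 occurs first or immediately after a 49, A drops that -1 (it is A's
-- internal 'no previous token' sentinel) while B keeps it, the intended generic behaviour.
def D_remove_duplicate_tokens (token_list : List Int) : Prop :=
  token_list.head? = some (-1) ∨ ∃ p ∈ token_list.zip token_list.tail, p.1 = 49 ∧ p.2 = -1
instance (token_list : List Int) : Decidable (D_remove_duplicate_tokens token_list) := by
  unfold D_remove_duplicate_tokens; infer_instance

def Spec_remove_duplicate_tokens (token_list : List Int) (out : List Int) : Prop :=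
  ¬ D_remove_duplicate_tokens token_list → out = remove_duplicate_tokens_alt token_list
instance (token_list : List Int) (out : List Int) : Decidable (Spec_remove_duplicate_tokens token_list out) := by
  unfold Spec_remove_duplicate_tokens; infer_instance

def pvDiffWitness_remove_duplicate_tokens : List Int := [-1]
def pvDiffWitnessOut_remove_duplicate_tokens : (List Int) × (List Int) := ([], [-1])

-- ===== CLAIM (what is proved, stated in full; the proofs are below) =====
def Claim_unchanged_remove_duplicate_tokens : Prop := ∀ (token_list : List Int), Dom_remove_duplicate_tokens token_list → Spec_remove_duplicate_tokens token_list (remove_duplicate_tokens token_list)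
def Claim_changed_remove_duplicate_tokens : Prop := Dom_remove_duplicate_tokens (pvDiffWitness_remove_duplicate_tokens) ∧ D_remove_duplicate_tokens (pvDiffWitness_remove_duplicate_tokens) ∧ remove_duplicate_tokens (pvDiffWitness_remove_duplicate_tokens) = pvDiffWitnessOut_remove_duplicate_tokens.1 ∧ remove_duplicate_tokens_alt (pvDiffWitness_remove_duplicate_tokens) = pvDiffWitnessOut_remove_duplicate_tokens.2 ∧ pvDiffWitnessOut_remove_duplicate_tokens.1 ≠ pvDiffWitnessOut_remove_duplicate_tokens.2
def Claim_exact_remove_duplicate_tokens : Prop := ∀ (token_list : List Int), Dom_remove_duplicate_tokens token_list → D_remove_duplicate_tokens token_list → remove_duplicate_tokens token_list ≠ remove_duplicate_tokens_alt token_list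

-- ===== LEMMAS AND PROOFS =====

-- recursive rendering of A's loop
def aRec : Int → List Int → List Int
  | _, [] => []
  | prev, t :: r => if t = 49 then aRec (-1) r
                    else if t ≠ prev then t :: aRec t r
                    else aRec prev r

-- recursive rendering of B's comprehension, carrying the previous element
def bRec : Option Int → List Int → List Int
  | _, [] => []
  | c, t :: r => (if t ≠ 49 ∧ c ≠ some t then [t] else []) ++ bRec (some t) r

-- A's prev_token as a function of the previous element
def fPrev : Option Int → Int
  | none => -1
  | some x => if x = 49 then -1 else x

-- the bad positions (a -1 at the start or right after a 49), relative to a context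
def BadP : Option Int → List Int → Prop
  | _, [] => False
  | c, t :: r => (t = -1 ∧ (c = none ∨ c = some 49)) ∨ BadP (some t) r

lemma aRec_step (c : Option Int) (t : Int) (r : List Int) :
    aRec (fPrev c) (t :: r) =
      (if t ≠ 49 ∧ t ≠ fPrev c then [t] else []) ++ aRec (fPrev (some t)) r := by
  by_cases h49 : t = 49
  · subst h49; simp [aRec, fPrev]
  · have hf : fPrev (some t) = t := by simp [fPrev, h49]
    rw [hf]
    by_cases hne : t = fPrev c
    · rw [if_neg (by simp [hne]), List.nil_append, ← hne]
      rw [aRec]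
      simp [h49]
    · rw [if_pos ⟨h49, hne⟩]
      rw [aRec]
      simp [h49, hne]

lemma keptA_imp_keptB (c : Option Int) (t : Int)
    (h : t ≠ 49 ∧ t ≠ fPrev c) : t ≠ 49 ∧ c ≠ some t := by
  refine ⟨h.1, ?_⟩
  intro hc
  apply h.2
  subst hc
  simp [fPrev, h.1]

lemma key (tl : List Int) : ∀ c, ¬ BadP c tl → aRec (fPrev c) tl = bRec c tl := by
  induction tl with
  | nil => intro c _; simp [aRec, bRec]
  | cons t r ih =>
    intro c hbad
    rw [aRec_step]
    unfold bRec
    have hbad' : ¬ BadP (some t) r := by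
      intro h; exact hbad (Or.inr h)
    rw [ih (some t) hbad']
    congr 1
    have hhead : ¬ (t = -1 ∧ (c = none ∨ c = some 49)) := by
      intro h; exact hbad (Or.inl h)
    by_cases h49 : t = 49
    · simp [h49]
    · rcases c with _ | x
      · have ht1 : t ≠ -1 := fun h => hhead ⟨h, Or.inl rfl⟩
        simp [fPrev, h49, ht1]
      · by_cases hx49 : x = 49
        · subst hx49
          have ht1 : t ≠ -1 := fun h => hhead ⟨h, Or.inr rfl⟩
          have : (some (49:Int)) ≠ some t := by simp [Ne.symm h49]
          simp [fPrev, h49, ht1, this]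
        · have : (fPrev (some x)) = x := by simp [fPrev, hx49]
          rw [this]
          by_cases htx : t = x
          · simp [htx]
          · have hxt : ¬ x = t := fun h => htx h.symm
            simp [htx, hxt]

-- bridge: A's foldl equals aRec
lemma aBridge (tl : List Int) : ∀ prev acc,
    (tl.foldl pvStepA (prev, acc)).2 = acc ++ aRec prev tl := by
  induction tl with
  | nil => intro prev acc; simp [aRec]
  | cons t r ih =>
    intro prev acc
    by_cases h49 : t = 49
    · subst h49; simp [List.foldl, pvStepA, aRec, ih]
    · by_cases hne : t = prev
      · subst hne; simp [List.foldl, pvStepA, aRec, h49, ih]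
      · simp [List.foldl, pvStepA, aRec, h49, hne, ih]

-- bridge: B's filter/map over the zipped pairs equals bRec
lemma bBridge (tl : List Int) : ∀ (c : Option Int),
    ((List.zip (c :: tl.map some) tl).filter
        (fun p => p.2 != 49 && p.1 != some p.2)).map Prod.snd = bRec c tl := by
  induction tl with
  | nil => intro c; simp [bRec]
  | cons t r ih =>
    intro c
    simp only [List.map, List.zip_cons_cons, List.filter]
    by_cases hk : t ≠ 49 ∧ c ≠ some t
    · have : ((t != 49 && c != some t) = true) := by
        simp [bne, hk.1, hk.2]
      rw [this]
      simp [bRec, hk, ih]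
    · have : ((t != 49 && c != some t) = false) := by
        rcases not_and_or.mp hk with h | h
        · simp [bne, not_not.mp h]
        · simp [bne, not_not.mp h]
      rw [this]
      simp [bRec, hk, ih]

-- D_ (closed form) is equivalent to the recursive BadP none
lemma D_iff_gen (tl : List Int) : ∀ c, BadP c tl ↔
    ((tl.head? = some (-1) ∧ (c = none ∨ c = some 49)) ∨
      ∃ p ∈ tl.zip tl.tail, p.1 = 49 ∧ p.2 = -1) := by
  induction tl with
  | nil => intro c; simp [BadP]
  | cons t r ih =>
    intro c
    unfold BadP
    rw [ih (some t)]
    cases r with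
    | nil => simp
    | cons u s =>
      simp only [List.head?, List.tail, List.zip_cons_cons, List.mem_cons]
      constructor
      · rintro (⟨h1, h2⟩ | ⟨⟨hu, ht⟩ | h⟩)
        · exact Or.inl ⟨by simp [h1], h2⟩
        · refine Or.inr ⟨(t, u), Or.inl rfl, ?_, by simpa using hu⟩
          simpa using ht
        · exact Or.inr (by
            obtain ⟨p, hp, h1, h2⟩ := h
            exact ⟨p, Or.inr hp, h1, h2⟩)
      · rintro (⟨h1, h2⟩ | ⟨p, hp, h1, h2⟩)
        · exact Or.inl ⟨by simpa using h1, h2⟩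
        · rcases hp with hp | hp
          · subst hp
            exact Or.inr (Or.inl ⟨by simpa using h2, by simpa using h1⟩)
          · exact Or.inr (Or.inr ⟨p, hp, h1, h2⟩)

lemma D_iff (tl : List Int) : D_remove_duplicate_tokens tl ↔ BadP none tl := by
  rw [D_iff_gen tl none]
  unfold D_remove_duplicate_tokens
  simp

-- the head contribution of A's output never exceeds B's
lemma keptLen_le (c : Option Int) (t : Int) :
    (if t ≠ 49 ∧ t ≠ fPrev c then ([t] : List Int) else []).length ≤
      (if t ≠ 49 ∧ c ≠ some t then ([t] : List Int) else []).length := by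
  by_cases hk : t ≠ 49 ∧ t ≠ fPrev c
  · rw [if_pos hk, if_pos (keptA_imp_keptB c t hk)]
  · rw [if_neg hk]; simp

-- lengths: A never keeps a token B drops …
lemma len_le (tl : List Int) : ∀ c, (aRec (fPrev c) tl).length ≤ (bRec c tl).length := by
  induction tl with
  | nil => intro c; simp [aRec, bRec]
  | cons t r ih =>
    intro c
    rw [aRec_step]
    unfold bRec
    rw [List.length_append, List.length_append]
    have htail := ih (some t)
    have hmono := keptLen_le c t
    omega

-- … and on a bad position B keeps strictly more
lemma len_lt (tl : List Int) : ∀ c, BadP c tl →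
    (aRec (fPrev c) tl).length < (bRec c tl).length := by
  induction tl with
  | nil => intro c h; exact absurd h (by simp [BadP])
  | cons t r ih =>
    intro c hbad
    rw [aRec_step]
    unfold bRec
    rcases hbad with ⟨ht, hc⟩ | htail
    · -- bad at the head: A drops t, B keeps it
      have hfA : fPrev c = -1 := by
        rcases hc with h | h <;> subst h <;> simp [fPrev]
      have hkA : ¬ (t ≠ 49 ∧ t ≠ fPrev c) := by
        rw [hfA, ht]; simp
      have hkB : t ≠ 49 ∧ c ≠ some t := by
        subst ht
        refine ⟨by omega, ?_⟩
        rcases hc with h | h <;> subst h <;> simp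
      rw [if_neg hkA, if_pos hkB, List.nil_append]
      have := len_le r (some t)
      simp only [List.length_append, List.length_cons]
      omega
    · have htail2 := ih (some t) htail
      have hmono := keptLen_le c t
      rw [List.length_append, List.length_append]
      omega

lemma portA_eq (tl : List Int) : remove_duplicate_tokens tl = aRec (-1) tl := by
  unfold remove_duplicate_tokens
  rw [aBridge tl (-1) []]
  simp

lemma portB_eq (tl : List Int) : remove_duplicate_tokens_alt tl = bRec none tl := by
  unfold remove_duplicate_tokens_alt
  exact bBridge tl none

-- ===== VERDICT (by name: the statement is the Claim_ definition above) =====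
theorem remove_duplicate_tokens_spec : Claim_unchanged_remove_duplicate_tokens := by
  intro tl _ hD
  rw [portA_eq, portB_eq]
  have hnb : ¬ BadP none tl := fun h => hD ((D_iff tl).mpr h)
  have h0 : fPrev none = -1 := rfl
  rw [← h0]
  exact key tl none hnb

theorem remove_duplicate_tokens_changed : Claim_changed_remove_duplicate_tokens := by
  unfold Claim_changed_remove_duplicate_tokens; decide

theorem remove_duplicate_tokens_tight : Claim_exact_remove_duplicate_tokens := by
  intro tl _ hD heq
  have hb : BadP none tl := (D_iff tl).mp hD
  have hlt := len_lt tl none hb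
  rw [portA_eq, portB_eq] at heq
  have h0 : fPrev none = -1 := rfl
  rw [h0, heq] at hlt
  exact lt_irrefl _ hlt
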